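-- pv_equiv track=rewrite | github.com/shanshanlaiche/Mitbbs_CountFrequentID | CountFrequentID.py | FindRecentFrequentID
-- ===== SOURCE A (Python) =====
-- def FindRecentFrequentID(IDList, TopN):
--     IDCount = {} # a dictionary to use ID as key and the appearing time as value
--     for i in range(len(IDList)):
--         IDCount[IDList[i]] = 0 # set initial count to zero
--     for i in range(len(IDList)):
--         IDCount[IDList[i]] = IDCount[IDList[i]] + 1
--
--     RecentFrequentID = []
--     for i in range(min(TopN,len(IDCount))):
--         RecentFrequentID.append(sorted(IDCount)[len(IDCount)-1-i] + '\n');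
--     return RecentFrequentID # a List of most TopN frequent post author
-- ===== SOURCE B (Python) =====
-- def FindRecentFrequentID(IDList, TopN):
--     remaining = set(IDList)
--     result = []
--     while len(result) < TopN and remaining:
--         top = max(remaining)
--         remaining.remove(top)
--         result.append(top + '\n')
--     return result
-- ===== Notes on version B (the rewrite author's own statement) =====
-- stated objective: faster
-- what changed: B never sorts: it builds set(IDList) and runs a selection loop that repeatedly extracts the current maximum (max + remove) from the remaining set until TopN ids are taken, whereas A counts into a dict and fully re-sorts the key list on every iteration of its selection loop.
import Mathlib
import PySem

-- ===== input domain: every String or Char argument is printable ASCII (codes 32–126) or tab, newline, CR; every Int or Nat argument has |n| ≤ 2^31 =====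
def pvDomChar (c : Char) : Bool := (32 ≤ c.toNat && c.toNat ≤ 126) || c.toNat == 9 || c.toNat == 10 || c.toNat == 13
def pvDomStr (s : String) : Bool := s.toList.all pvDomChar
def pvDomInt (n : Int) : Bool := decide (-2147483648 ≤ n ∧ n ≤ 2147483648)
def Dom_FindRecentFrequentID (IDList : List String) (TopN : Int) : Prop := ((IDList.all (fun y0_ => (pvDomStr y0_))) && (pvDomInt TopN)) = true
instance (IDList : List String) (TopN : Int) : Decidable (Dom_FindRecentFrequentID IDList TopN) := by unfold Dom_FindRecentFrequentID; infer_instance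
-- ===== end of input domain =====

-- B replaces A's count dict and per-iteration full re-sort by a sort-free selection loop
-- (repeatedly extract the maximum of the remaining distinct IDs) — objective: faster.

-- ===== PORT A =====
def FindRecentFrequentID (IDList : List String) (TopN : Int) : List String :=
  -- IDCount = {}; for i in range(len(IDList)): IDCount[IDList[i]] = 0
  let IDCount : PySem.Dict String Int :=
    (PySem.List.pyRange 0 (IDList.length : Int) 1).foldl
      (fun d i => d.insert (PySem.List.pyGetD IDList i "") 0) PySem.Dict.empty
  -- for i in range(len(IDList)): IDCount[IDList[i]] = IDCount[IDList[i]] + 1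
  let IDCount2 : PySem.Dict String Int :=
    (PySem.List.pyRange 0 (IDList.length : Int) 1).foldl
      (fun d i => d.insert (PySem.List.pyGetD IDList i "")
        (d.getD (PySem.List.pyGetD IDList i "") 0 + 1)) IDCount
  -- for i in range(min(TopN, len(IDCount))): RecentFrequentID.append(sorted(IDCount)[len(IDCount)-1-i] + '\n')
  (PySem.List.pyRange 0 (min TopN (PySem.Dict.size IDCount2 : Int)) 1).foldl
    (fun acc i => acc ++
      [PySem.List.pyGetD (PySem.List.sorted (PySem.Dict.keys IDCount2) (fun x => x) false)
        ((PySem.Dict.size IDCount2 : Int) - 1 - i) "" ++ "\n"]) []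

-- ===== PORT B =====
-- while len(result) < TopN and remaining: top = max(remaining); remaining.remove(top); result.append(top + '\n')
def selGo (remaining : PySem.Set String) (result : List String) (TopN : Int) : List String :=
  if (result.length : Int) < TopN ∧ remaining ≠ [] then
    match hm : PySem.List.max? remaining (fun x => x) with
    | none => result  -- unreachable: remaining ≠ []
    | some top =>
      match hr : PySem.Set.remove? remaining top with
      | none => result  -- unreachable: top ∈ remaining
      | some remaining' => selGo remaining' (result ++ [top ++ "\n"]) TopN
  else result
termination_by remaining.length
decreasing_by
  have htop : top ∈ remaining := PySem.List.max?_mem hm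
  simp only [PySem.Set.remove?] at hr
  split at hr
  · cases hr
    simp only [PySem.Set.discard]
    rw [List.length_filter_lt_length_iff_exists]
    exact ⟨top, htop, by simp⟩
  · cases hr

def FindRecentFrequentID_alt (IDList : List String) (TopN : Int) : List String :=
  selGo (PySem.Set.ofList IDList) [] TopN

-- ===== PRECONDITION & SPEC =====
def Spec_FindRecentFrequentID (IDList : List String) (TopN : Int) (out : List String) : Prop := out = FindRecentFrequentID_alt IDList TopN
instance (IDList : List String) (TopN : Int) (out : List String) : Decidable (Spec_FindRecentFrequentID IDList TopN out) := by unfold Spec_FindRecentFrequentID; infer_instance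

-- ===== CLAIM (what is proved, stated in full; the proofs are below) =====
def Claim_equal_FindRecentFrequentID : Prop := ∀ (IDList : List String) (TopN : Int), Dom_FindRecentFrequentID IDList TopN → Spec_FindRecentFrequentID IDList TopN (FindRecentFrequentID IDList TopN)

-- ===== LEMMAS AND PROOFS =====

-- updating a Set with elements it already contains leaves it unchanged
lemma set_update_of_subset {α : Type} [BEq α] [LawfulBEq α] (l : List α) (s : PySem.Set α)
    (h : ∀ x ∈ l, x ∈ s) : PySem.Set.update s l = s := by
  induction l generalizing s with
  | nil => rfl
  | cons x xs ih =>
      have hx : x ∈ s := h x (by simp)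
      have : PySem.Set.add s x = s := by
        simp [PySem.Set.add, PySem.Set.contains, hx]
      simp only [PySem.Set.update, List.foldl_cons] at *
      rw [this]
      exact ih s (fun y hy => h y (by simp [hy]))

-- the selection loop of A reads the ascending sorted list back-to-front: it builds take k of the reverse
lemma sel_loop (s : List String) (k : Nat) (hk : k ≤ s.length) :
    (PySem.List.pyRange 0 (k : Int) 1).foldl
      (fun acc i => acc ++ [PySem.List.pyGetD s ((s.length : Int) - 1 - i) "" ++ "\n"]) []
    = (s.reverse.take k).map (fun name => name ++ "\n") := by
  induction k with
  | zero => simp [PySem.List.pyRange_one_eq_nil]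
  | succ k ih =>
      have hki : ((k : Int) + 1) = ((k + 1 : Nat) : Int) := by push_cast; ring
      have hsplit : PySem.List.pyRange 0 ((k + 1 : Nat) : Int) 1
          = PySem.List.pyRange 0 (k : Int) 1 ++ [(k : Int)] := by
        rw [← hki]
        exact PySem.List.pyRange_one_succ_right (by exact_mod_cast Nat.zero_le k)
      have hk' : k ≤ s.length := Nat.le_of_succ_le hk
      have hklt : k < s.length := hk
      rw [hsplit, List.foldl_append, ih hk']
      have hidx : ((s.length : Int) - 1 - (k : Int)) = ((s.length - 1 - k : Nat) : Int) := by
        omega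
      have hlt : s.length - 1 - k < s.length := by omega
      have hget : PySem.List.pyGetD s ((s.length : Int) - 1 - (k : Int)) ""
          = s[s.length - 1 - k] := by
        rw [hidx, PySem.List.pyGetD_natCast]
        exact List.getD_eq_getElem s "" hlt
      have hkrev : k < s.reverse.length := by simpa using hklt
      have hrevget : s.reverse[k] = s[s.length - 1 - k] := by
        rw [List.getElem_reverse]
      have htake : s.reverse.take (k + 1) = s.reverse.take k ++ [s.reverse[k]] := by
        rw [List.take_add_one, List.getElem?_eq_getElem hkrev]
        rfl
      simp only [List.foldl_cons, List.foldl_nil, hget, htake, List.map_append,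
        List.map_cons, List.map_nil, hrevget]

-- B's selection loop produces exactly the first (TopN - |result|) elements of the descending sort
lemma selGo_eq (rem : PySem.Set String) (out : List String) (TopN : Int) (hnd : rem.Nodup) :
    selGo rem out TopN
    = out ++ ((PySem.List.sorted rem (fun x => x) true).take
        ((TopN - out.length).toNat)).map (fun name => name ++ "\n") := by
  induction hlen : rem.length using Nat.strong_induction_on generalizing rem out with
  | _ n ih =>
  rw [selGo]
  by_cases hc : (out.length : Int) < TopN ∧ rem ≠ []
  · rw [if_pos hc]
    obtain ⟨hlt, hne⟩ := hc
    -- descending sorted list is nonempty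
    obtain ⟨m, t, hmt⟩ : ∃ m t, PySem.List.sorted rem (fun x : String => x) true = m :: t := by
      rcases h : PySem.List.sorted rem (fun x : String => x) true with _ | ⟨m, t⟩
      · exact absurd ((PySem.List.sorted_eq_nil_iff _ _ _).mp h) hne
      · exact ⟨m, t, rfl⟩
    have hperm : (PySem.List.sorted rem (fun x : String => x) true).Perm rem :=
      PySem.List.sorted_perm _ _ _
    have hmmem : m ∈ rem := hperm.mem_iff.mp (by simp [hmt])
    split
    · next hm0 => exact absurd ((PySem.List.max?_eq_none_iff _ _).mp hm0) hne
    · next top hm0 =>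
      have htopmem : top ∈ rem := PySem.List.max?_mem hm0
      have htop : top = m := by
        have h1 : top ≤ m := PySem.List.key_head_sorted_rev_ge rem (fun x => x) hmt top htopmem
        have h2 : m ≤ top := PySem.List.max?_isMax hm0 m hmmem
        exact le_antisymm h1 h2
      subst htop
      -- remove? succeeds and yields rem.erase top
      have herase : PySem.Set.discard rem top = rem.erase top := by
        rw [hnd.erase_eq_filter]
        rfl
      have hremove : PySem.Set.remove? rem top = some (rem.erase top) := by
        simp [PySem.Set.remove?, PySem.Set.contains, htopmem, herase]
      split
      · next hr0 => rw [hremove] at hr0; cases hr0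
      · next rem' hr0 =>
        rw [hremove] at hr0
        injection hr0 with hr0
        subst hr0
        -- descending sort of the rest is t
        have hndesc : (top :: t).Nodup := hmt ▸ (hperm.nodup_iff.mpr hnd)
        have hpermE : (rem.erase top).Perm t := by
          have := (hperm.symm.erase top)
          rwa [hmt, List.erase_cons_head] at this
        have hpw : List.Pairwise (fun a b : String => b < a) t := by
          have hle : List.Pairwise (fun a b : String => b ≤ a) (top :: t) := by
            rw [← hmt]; exact PySem.List.sorted_pairwise_rev rem (fun x => x)
          have := (hle.and hndesc).imp (fun {a b} h => lt_of_le_of_ne h.1 (Ne.symm h.2))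
          exact this.of_cons
        have hsortE : PySem.List.sorted (rem.erase top) (fun x : String => x) true = t :=
          PySem.List.sorted_rev_eq_of_perm_of_pairwise_gt _ _ _ hpermE.symm hpw
        -- apply the induction hypothesis
        have hlt' : (rem.erase top).length < n := by
          have hpos : 0 < rem.length := List.length_pos_of_ne_nil hne
          rw [← hlen, List.length_erase_of_mem hmmem]
          omega
        rw [ih _ hlt' (rem.erase top) (out ++ [top ++ "\n"]) (hnd.erase top) rfl, hsortE, hmt]
        have hk : (TopN - out.length).toNat = (TopN - (out.length + 1)).toNat + 1 := by omega
        rw [List.append_assoc]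
        congr 1
        simp only [List.length_append, List.length_singleton]
        rw [hk, List.take_succ_cons, List.map_cons]
        push_cast
        rfl
  · rw [if_neg hc]
    rcases not_and_or.mp hc with h | h
    · have : (TopN - out.length).toNat = 0 := by omega
      simp [this]
    · have : rem = [] := not_not.mp h
      subst this
      simp [show PySem.List.sorted ([] : List String) (fun x : String => x) true = [] from rfl]

-- ===== VERDICT (by name: the statement is the Claim_ definition above) =====
theorem FindRecentFrequentID_spec : Claim_equal_FindRecentFrequentID := by
  intro IDList TopN _
  unfold Spec_FindRecentFrequentID FindRecentFrequentID FindRecentFrequentID_alt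
  have hmap : (PySem.List.pyRange 0 (IDList.length : Int) 1).map
      (fun j => PySem.List.pyGetD IDList j "") = IDList :=
    PySem.List.map_pyGetD_pyRange_zero' IDList ""
  -- keys of the first dict
  have hk1 : ((PySem.List.pyRange 0 (IDList.length : Int) 1).foldl
      (fun d i => d.insert (PySem.List.pyGetD IDList i "") 0)
      (PySem.Dict.empty : PySem.Dict String Int)).keys = PySem.Set.ofList IDList := by
    rw [PySem.Dict.keys_foldl_insert_key _ (fun i => PySem.List.pyGetD IDList i "")
      (fun _ _ => (0 : Int)) _, PySem.Dict.keys_empty, hmap]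
    rfl
  -- keys of the second dict (same keys: every inserted key is already present)
  have hk2 : (((PySem.List.pyRange 0 (IDList.length : Int) 1).foldl
      (fun d i => d.insert (PySem.List.pyGetD IDList i "")
        (d.getD (PySem.List.pyGetD IDList i "") 0 + 1))
      ((PySem.List.pyRange 0 (IDList.length : Int) 1).foldl
        (fun d i => d.insert (PySem.List.pyGetD IDList i "") 0)
        (PySem.Dict.empty : PySem.Dict String Int)))).keys = PySem.Set.ofList IDList := by
    rw [PySem.Dict.keys_foldl_insert_key _ (fun i => PySem.List.pyGetD IDList i "")
      (fun d i => d.getD (PySem.List.pyGetD IDList i "") 0 + 1) _, hk1, hmap]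
    exact set_update_of_subset IDList _ (fun x hx => (PySem.Set.mem_ofList IDList x).mpr hx)
  have hsize : ∀ (d : PySem.Dict String Int), d.size = d.keys.length := by
    intro d; simp [PySem.Dict.size, PySem.Dict.keys]
  simp only [hsize, hk2]
  -- B's loop is take of the descending sort of the distinct IDs
  rw [selGo_eq _ _ _ (PySem.Set.nodup_ofList IDList)]
  -- descending sort = reverse of ascending sort
  have hrev : PySem.List.sorted (PySem.Set.ofList IDList) (fun x => x) true
      = (PySem.List.sorted (PySem.Set.ofList IDList) (fun x => x) false).reverse := by
    refine PySem.List.sorted_rev_eq_of_perm_of_pairwise_gt _ _ _ ?_ ?_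
    · exact (List.reverse_perm _).trans (PySem.List.sorted_perm _ _ _)
    · exact (List.pairwise_reverse).mpr (PySem.List.sorted_ofList_pairwise_lt IDList)
  rw [hrev]
  have hlen : (PySem.List.sorted (PySem.Set.ofList IDList) (fun x => x) false).length
      = (PySem.Set.ofList IDList).length := PySem.List.length_sorted _ _ _
  set sAsc := PySem.List.sorted (PySem.Set.ofList IDList) (fun x => x) false with hsAsc
  by_cases hT : TopN ≤ 0
  · have h1 : min TopN ((PySem.Set.ofList IDList).length : Int) ≤ 0 := le_trans (min_le_left _ _) hT
    rw [PySem.List.pyRange_one_eq_nil h1]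
    simp
    exact Or.inl hT
  · push Not at hT
    set n := (PySem.Set.ofList IDList).length with hn
    set k := (min TopN (n : Int)).toNat with hkdef
    have hkn : k ≤ sAsc.length := by rw [hlen]; omega
    have hcast' : ((k : Nat) : Int) = min TopN (sAsc.length : Int) := by rw [hlen]; omega
    rw [← hlen, ← hcast', sel_loop sAsc k hkn]
    simp only [List.nil_append, List.length_nil]
    congr 1
    rw [List.take_eq_take_iff]
    simp only [List.length_reverse, hlen]
    omega
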